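-- pv_equiv track=rewrite | github.com/anshmehta7x/adobe-hack | round1b/processor.py | _remove_heading_from_content
-- ===== SOURCE A (Python) =====
-- def _remove_heading_from_content(content: str, heading: str) -> str:
--     """Remove heading text from beginning of content"""
--     lines = content.split('\n')
--     result_lines = []
--     heading_found = False
--
--     for line in lines:
--         if not heading_found and heading.strip() in line:
--             heading_found = True
--             continue
--         elif heading_found:
--             result_lines.append(line)
--
--     return '\n'.join(result_lines) if heading_found else content
-- ===== SOURCE B (Python) =====
-- def _remove_heading_from_content(content: str, heading: str) -> str:
--     """Remove heading text from beginning of content"""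
--     lines = content.split('\n')
--     h = heading.strip()
--     idx = next((i for i, line in enumerate(lines) if h in line), None)
--     if idx is None:
--         return content
--     return '\n'.join(lines[idx + 1:])
-- ===== Notes on version B (the rewrite author's own statement) =====
-- stated objective: simpler
-- what changed: Replaces the flag-plus-accumulator pass with find-first-matching-line-index then slice-and-join of the tail.
import Mathlib
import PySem

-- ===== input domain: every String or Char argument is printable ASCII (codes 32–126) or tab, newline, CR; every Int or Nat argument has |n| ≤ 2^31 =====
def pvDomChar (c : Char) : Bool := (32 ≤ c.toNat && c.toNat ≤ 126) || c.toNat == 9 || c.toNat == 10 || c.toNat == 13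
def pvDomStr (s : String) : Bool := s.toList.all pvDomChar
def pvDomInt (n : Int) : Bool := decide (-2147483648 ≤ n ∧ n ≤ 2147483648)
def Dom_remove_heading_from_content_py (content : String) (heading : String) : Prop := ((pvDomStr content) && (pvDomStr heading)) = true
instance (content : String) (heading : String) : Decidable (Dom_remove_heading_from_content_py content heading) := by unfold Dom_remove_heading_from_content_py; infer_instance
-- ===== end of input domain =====

-- B replaces A's flag-plus-accumulator single pass by locating the index of the
-- first line containing the stripped heading and joining the tail slice (objective: simpler).


-- ===== PORT A =====
-- loop body of A: state = (result_lines, heading_found)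
def pvStepA (heading : String) (st : List String × Bool) (line : String) : List String × Bool :=
  if !st.2 && PySem.Str.isIn (PySem.Str.strip heading) line then (st.1, true)
  else if st.2 then (st.1 ++ [line], st.2)
  else st

def remove_heading_from_content_py (content : String) (heading : String) : String :=
  let lines := (PySem.Str.split? content "\n").getD []  -- sep "\n" ≠ "", so split? is always some
  let st := lines.foldl (pvStepA heading) ([], false)
  if st.2 then PySem.Str.join "\n" st.1 else content

-- ===== PORT B =====
-- index of the first line containing h (= the 'next(... enumerate ...)' search in Source B)
def pvFindHeadingIdx (h : String) : List String → Option Nat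
  | [] => none
  | l :: rest => if PySem.Str.isIn h l then some 0 else (pvFindHeadingIdx h rest).map (· + 1)

def remove_heading_from_content_py_alt (content : String) (heading : String) : String :=
  let lines := (PySem.Str.split? content "\n").getD []  -- sep "\n" ≠ "", so split? is always some
  match pvFindHeadingIdx (PySem.Str.strip heading) lines with
  | none => content
  | some i => PySem.Str.join "\n" (lines.drop (i + 1))

-- ===== PRECONDITION & SPEC =====
def Spec_remove_heading_from_content_py (content : String) (heading : String) (out : String) : Prop := out = remove_heading_from_content_py_alt content heading
instance (content : String) (heading : String) (out : String) : Decidable (Spec_remove_heading_from_content_py content heading out) := by unfold Spec_remove_heading_from_content_py; infer_instance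

-- ===== CLAIM (what is proved, stated in full; the proofs are below) =====
def Claim_equal_remove_heading_from_content_py : Prop := ∀ (content : String) (heading : String), Dom_remove_heading_from_content_py content heading → Spec_remove_heading_from_content_py content heading (remove_heading_from_content_py content heading)

-- ===== LEMMAS AND PROOFS =====
-- once the heading was found, the loop just appends every remaining line
theorem pvFoldl_found (heading : String) (rest : List String) (acc : List String) :
    rest.foldl (pvStepA heading) (acc, true) = (acc ++ rest, true) := by
  induction rest generalizing acc with
  | nil => simp
  | cons l rest ih =>
    rw [List.foldl_cons]
    have hstep : pvStepA heading (acc, true) l = (acc ++ [l], true) := by simp [pvStepA]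
    rw [hstep, ih]
    simp

-- A's loop from the not-yet-found state, characterised by B's first-match index
theorem pvFoldl_eq_find (heading : String) (lines : List String) (acc : List String) :
    lines.foldl (pvStepA heading) (acc, false) =
    (match pvFindHeadingIdx (PySem.Str.strip heading) lines with
     | none => (acc, false)
     | some i => (acc ++ lines.drop (i + 1), true)) := by
  induction lines generalizing acc with
  | nil => simp [pvFindHeadingIdx]
  | cons l rest ih =>
    rw [List.foldl_cons]
    by_cases hl : PySem.Chars.isIn (PySem.Chars.strip heading.toList) l.toList = true
    · have hstep : pvStepA heading (acc, false) l = (acc, true) := by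
        simp [pvStepA, hl]
      rw [hstep, pvFoldl_found]
      simp [pvFindHeadingIdx, hl]
    · have hstep : pvStepA heading (acc, false) l = (acc, false) := by
        simp [pvStepA, hl]
      rw [hstep, ih]
      simp only [pvFindHeadingIdx]
      cases pvFindHeadingIdx (PySem.Str.strip heading) rest <;> simp [hl]

-- ===== VERDICT (by name: the statement is the Claim_ definition above) =====
theorem remove_heading_from_content_py_spec : Claim_equal_remove_heading_from_content_py := by
  intro content heading _
  unfold Spec_remove_heading_from_content_py remove_heading_from_content_py remove_heading_from_content_py_alt
  simp only [pvFoldl_eq_find]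
  cases pvFindHeadingIdx (PySem.Str.strip heading) ((PySem.Str.split? content "\n").getD []) <;> simp
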